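-- pv_equiv track=rewrite | github.com/cloudmesh/cloudmesh-common | src/cloudmesh/common/Shell.py | replace_lines_between
-- ===== SOURCE A (Python) =====
-- def replace_lines_between(lines, what_from, what_to, content):
--     """Replaces the content between the markers with the specified content.
--
--     Args:
--         lines (str): The multiline string to search within.
--         what_from (str): The starting marker.
--         what_to (str): The ending marker.
--         content (str): The content to replace the lines between the markers.
--
--     Returns:
--         str: The modified multiline string.
--     """
--     lines = lines.splitlines()
--     start_index = None
--     end_index = None
--     for i, line in enumerate(lines):
--         if what_from in line:
--             start_index = i
--         if what_to in line:
--             end_index = i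
--             break
--     if start_index is not None and end_index is not None:
--         lines[start_index + 1 : end_index] = content.splitlines()
--     return "\n".join(lines)
-- ===== SOURCE B (Python) =====
-- def replace_lines_between(lines, what_from, what_to, content):
--     """Replaces the content between the markers with the specified content."""
--     xs = lines.splitlines()
--     end_index = next((i for i, line in enumerate(xs) if what_to in line), None)
--     if end_index is not None:
--         start_index = next((i for i in range(end_index, -1, -1) if what_from in xs[i]), None)
--         if start_index is not None:
--             xs[start_index + 1 : end_index] = content.splitlines()
--     return "\n".join(xs)
-- ===== Notes on version B (the rewrite author's own statement) =====
-- stated objective: alternative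
-- what changed: A's single interleaved forward pass that keeps overwriting start_index is replaced by a forward search for the first end-marker line followed by a backward search from it for the nearest start-marker line, splicing only when both are found.
import Mathlib
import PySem

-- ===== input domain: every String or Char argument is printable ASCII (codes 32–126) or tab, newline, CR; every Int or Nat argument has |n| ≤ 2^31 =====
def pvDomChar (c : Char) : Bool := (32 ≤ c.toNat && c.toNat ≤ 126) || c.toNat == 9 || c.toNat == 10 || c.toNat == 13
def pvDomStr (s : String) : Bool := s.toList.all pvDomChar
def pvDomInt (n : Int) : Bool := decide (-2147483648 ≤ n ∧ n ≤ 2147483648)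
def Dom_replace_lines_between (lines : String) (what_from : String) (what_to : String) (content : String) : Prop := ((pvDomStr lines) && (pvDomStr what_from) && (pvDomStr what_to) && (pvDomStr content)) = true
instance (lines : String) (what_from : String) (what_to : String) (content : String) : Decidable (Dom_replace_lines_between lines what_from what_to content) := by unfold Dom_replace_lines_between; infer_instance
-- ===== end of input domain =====

-- B replaces A's single interleaved forward pass by a forward search for the first end-marker
-- line followed by a backward search for the start marker (alternative decomposition, same cost).

-- ===== PORT A =====
-- A's single forward enumerate loop: start_index overwritten at every what_from hit,
-- loop breaks at the first what_to hit.
def pvAloop (what_from what_to : String) : List String → Nat → Option Nat → Option Nat × Option Nat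
  | [], _, s => (s, none)
  | l :: ls, i, s =>
    let s' := if PySem.Str.isIn what_from l then some i else s
    if PySem.Str.isIn what_to l then (s', some i) else pvAloop what_from what_to ls (i + 1) s'

def replace_lines_between (lines : String) (what_from : String) (what_to : String) (content : String) : String :=
  match pvAloop what_from what_to (PySem.Str.splitlines lines) 0 none with
  | (some s, some e) =>
      -- xs[s+1:e] = content.splitlines(); exact Python slice assignment for 0 ≤ s ≤ e ≤ len xs
      PySem.Str.join "\n" ((PySem.Str.splitlines lines).take (s + 1) ++ PySem.Str.splitlines content ++ (PySem.Str.splitlines lines).drop (max (s + 1) e))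
  | _ => PySem.Str.join "\n" (PySem.Str.splitlines lines)

-- ===== PORT B =====
-- Source B: end_index = first index whose line contains what_to
def pvBfirstTo (what_to : String) : List String → Option Nat
  | [] => none
  | l :: ls => if PySem.Str.isIn what_to l then some 0 else (pvBfirstTo what_to ls).map (· + 1)

-- Source B: backward scan over range(end_index, -1, -1) for the last line ≤ end containing what_from
def pvBback (what_from : String) (xs : List String) : Nat → Option Nat
  | 0 => if PySem.Str.isIn what_from (xs.getD 0 "") then some 0 else none
  | j + 1 =>
    if PySem.Str.isIn what_from (xs.getD (j + 1) "") then some (j + 1)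
    else pvBback what_from xs j

def replace_lines_between_alt (lines : String) (what_from : String) (what_to : String) (content : String) : String :=
  match pvBfirstTo what_to (PySem.Str.splitlines lines) with
  | none => PySem.Str.join "\n" (PySem.Str.splitlines lines)
  | some e =>
    match pvBback what_from (PySem.Str.splitlines lines) e with
    | none => PySem.Str.join "\n" (PySem.Str.splitlines lines)
    | some s =>
        -- xs[s+1:e] = content.splitlines(); exact Python slice assignment for 0 ≤ s ≤ e ≤ len xs
        PySem.Str.join "\n" ((PySem.Str.splitlines lines).take (s + 1) ++ PySem.Str.splitlines content ++ (PySem.Str.splitlines lines).drop (max (s + 1) e))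

-- ===== PRECONDITION & SPEC =====
def Spec_replace_lines_between (lines : String) (what_from : String) (what_to : String) (content : String) (out : String) : Prop := out = replace_lines_between_alt lines what_from what_to content
instance (lines : String) (what_from : String) (what_to : String) (content : String) (out : String) : Decidable (Spec_replace_lines_between lines what_from what_to content out) := by unfold Spec_replace_lines_between; infer_instance

-- ===== CLAIM (what is proved, stated in full; the proofs are below) =====
def Claim_equal_replace_lines_between : Prop := ∀ (lines : String) (what_from : String) (what_to : String) (content : String), Dom_replace_lines_between lines what_from what_to content → Spec_replace_lines_between lines what_from what_to content (replace_lines_between lines what_from what_to content)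

-- ===== LEMMAS AND PROOFS =====

-- last index of ls whose line contains what_from (proof-side characterisation)
def pvLastFrom (what_from : String) : List String → Option Nat
  | [] => none
  | l :: ls =>
    match pvLastFrom what_from ls with
    | some j => some (j + 1)
    | none => if PySem.Str.isIn what_from l then some 0 else none

def pvOpt (o : Option Nat) (i : Nat) (s : Option Nat) : Option Nat :=
  match o with
  | some j => some (i + j)
  | none => s

lemma pvAloop_eq (what_from what_to : String) :
    ∀ (ls : List String) (i : Nat) (s : Option Nat),
      pvAloop what_from what_to ls i s =
        match pvBfirstTo what_to ls with
        | some k => (pvOpt (pvLastFrom what_from (ls.take (k + 1))) i s, some (i + k))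
        | none => (pvOpt (pvLastFrom what_from ls) i s, none) := by
  intro ls
  induction ls with
  | nil => intro i s; simp [pvAloop, pvBfirstTo, pvLastFrom, pvOpt]
  | cons l ls ih =>
    intro i s
    by_cases ht : PySem.Chars.isIn what_to.toList l.toList = true
    · simp only [pvAloop, pvBfirstTo, PySem.Str.isIn, ht, if_true, List.take_succ_cons,
        List.take_zero]
      by_cases hf : PySem.Chars.isIn what_from.toList l.toList = true <;>
        simp [pvLastFrom, pvOpt, PySem.Str.isIn, hf]
    · simp only [pvAloop, pvBfirstTo, PySem.Str.isIn, ht]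
      rw [ih]
      cases hk : pvBfirstTo what_to ls with
      | none =>
        cases hj : pvLastFrom what_from ls with
        | none =>
          by_cases hf : PySem.Chars.isIn what_from.toList l.toList = true <;>
            simp [pvLastFrom, pvOpt, PySem.Str.isIn, hj, hf]
        | some j =>
          simp [pvLastFrom, pvOpt, hj]
          omega
      | some k =>
        cases hj : pvLastFrom what_from (ls.take (k + 1)) with
        | none =>
          by_cases hf : PySem.Chars.isIn what_from.toList l.toList = true <;>
            simp [pvLastFrom, pvOpt, PySem.Str.isIn, hj, hf] <;> omega
        | some j =>
          simp [pvLastFrom, pvOpt, hj]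
          constructor <;> omega

lemma pvLastFrom_append_singleton (what_from l : String) (ys : List String) :
    pvLastFrom what_from (ys ++ [l]) =
      if PySem.Str.isIn what_from l then some ys.length else pvLastFrom what_from ys := by
  induction ys with
  | nil =>
    by_cases hf : PySem.Chars.isIn what_from.toList l.toList = true <;>
      simp [pvLastFrom, PySem.Str.isIn, hf]
  | cons y ys ih =>
    simp only [List.cons_append, pvLastFrom, ih]
    by_cases hf : PySem.Chars.isIn what_from.toList l.toList = true <;>
      simp [PySem.Str.isIn, hf]

lemma pvBback_eq (what_from : String) (xs : List String) :
    ∀ (e : Nat), e < xs.length →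
      pvBback what_from xs e = pvLastFrom what_from (xs.take (e + 1)) := by
  intro e
  induction e with
  | zero =>
    intro he
    have h1 : xs.take 1 = [xs.getD 0 ""] := by
      cases xs with
      | nil => simp at he
      | cons a as => simp
    rw [h1]
    simp [pvBback, pvLastFrom, PySem.Str.isIn]
  | succ j ih =>
    intro he
    have hj : j < xs.length := by omega
    have htake : xs.take (j + 1 + 1) = xs.take (j + 1) ++ [xs.getD (j + 1) ""] := by
      rw [List.take_add_one]
      have hg : xs[j+1]? = some (xs.getD (j + 1) "") := by
        simp [List.getD_eq_getElem?_getD, List.getElem?_eq_getElem he]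
      rw [hg]
      rfl
    rw [htake, pvLastFrom_append_singleton]
    have hlen : (xs.take (j + 1)).length = j + 1 := by
      simp [List.length_take]; omega
    rw [hlen]
    simp only [pvBback, PySem.Str.isIn]
    split_ifs with hf
    · rfl
    · exact ih hj

lemma pvBfirstTo_lt_length (what_to : String) :
    ∀ (xs : List String) (e : Nat), pvBfirstTo what_to xs = some e → e < xs.length := by
  intro xs
  induction xs with
  | nil => intro e h; simp [pvBfirstTo] at h
  | cons l ls ih =>
    intro e h
    rw [pvBfirstTo] at h
    by_cases ht : PySem.Chars.isIn what_to.toList l.toList = true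
    · simp [PySem.Str.isIn, ht] at h
      simp [← h]
    · simp [PySem.Str.isIn, ht] at h
      obtain ⟨k, hk, hke⟩ := h
      have := ih k hk
      simp; omega

-- ===== VERDICT (by name: the statement is the Claim_ definition above) =====
theorem replace_lines_between_spec : Claim_equal_replace_lines_between := by
  intro lines what_from what_to content _
  unfold Spec_replace_lines_between replace_lines_between replace_lines_between_alt
  rw [pvAloop_eq]
  cases hk : pvBfirstTo what_to (PySem.Str.splitlines lines) with
  | none => simp [pvOpt]
  | some k =>
    have hlt := pvBfirstTo_lt_length what_to _ k hk
    simp only [pvBback_eq what_from _ k hlt]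
    cases hj : pvLastFrom what_from ((PySem.Str.splitlines lines).take (k + 1)) with
    | none => simp [pvOpt]
    | some j => simp [pvOpt]
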